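-- pv_equiv track=rewrite | github.com/pypi-data/pypi-mirror-203 | packages/navajo/navajo-0.4.1-py3-none-any.whl/navajo/server/split.py | _contains_unmatched_lp
-- ===== SOURCE A (Python) =====
-- def _contains_unmatched_lp(string):
--     stack = []
--     for char in string:
--         if char == '(':
--             stack.append(char)
--         elif char == ')':
--             if not stack:
--                 return True
--             stack.pop()
--
--     return bool(stack)
-- ===== SOURCE B (Python) =====
-- def _contains_unmatched_lp(string):
--     # Reduction/rewriting approach: keep only parentheses, then repeatedly
--     # delete adjacent matched pairs "()" until none remain; whatever is left
--     # (a string of the form ")))(((" ) is exactly the unmatched parens.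
--     s = ''.join(c for c in string if c in '()')
--     while '()' in s:
--         s = s.replace('()', '')
--     return bool(s)
-- ===== Notes on version B (the rewrite author's own statement) =====
-- stated objective: alternative
-- what changed: Replaces the single-pass stack scan by a string-rewriting reduction: filter to parens only, then repeatedly delete adjacent matched '()' pairs until none remain; unmatched parens exist iff the residue is nonempty.
import Mathlib
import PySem

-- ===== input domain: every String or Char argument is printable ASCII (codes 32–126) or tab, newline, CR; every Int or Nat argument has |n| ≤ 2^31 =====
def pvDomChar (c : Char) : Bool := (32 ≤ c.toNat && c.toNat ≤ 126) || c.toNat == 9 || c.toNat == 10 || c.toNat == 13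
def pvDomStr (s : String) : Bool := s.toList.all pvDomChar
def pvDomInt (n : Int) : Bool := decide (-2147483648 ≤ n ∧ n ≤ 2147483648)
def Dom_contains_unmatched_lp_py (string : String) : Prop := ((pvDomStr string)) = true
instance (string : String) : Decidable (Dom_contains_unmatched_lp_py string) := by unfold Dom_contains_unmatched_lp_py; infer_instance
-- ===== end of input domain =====

-- B replaces A's single-pass stack scan by a string-rewriting reduction (filter to parens,
-- repeatedly delete adjacent "()" pairs until none remain); alternative algorithm, not faster.

-- ===== PORT A =====
-- A's loop: a stack of '(' chars, early return True on ')' with empty stack.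
def pvLoopA : List Char → List Char → Bool
  | [], stack => !stack.isEmpty
  | c :: rest, stack =>
    if c = '(' then pvLoopA rest ('(' :: stack)
    else if c = ')' then
      match stack with
      | [] => true
      | _ :: t => pvLoopA rest t
    else pvLoopA rest stack

def contains_unmatched_lp_py (string : String) : Bool :=
  pvLoopA string.toList []

-- ===== PORT B =====
-- c in '()'
def pvParens (c : Char) : Bool := c = '(' || c = ')'

-- Python s.replace('()', ''): one left-to-right pass deleting each non-overlapping
-- occurrence of "()"; exact for this two-character pattern.
def pvRepl : List Char → List Char
  | [] => []
  | [c] => [c]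
  | c1 :: c2 :: rest =>
    if c1 = '(' ∧ c2 = ')' then pvRepl rest else c1 :: pvRepl (c2 :: rest)

-- Python "'()' in s": substring test, exact for the two-character pattern.
def pvHasPair : List Char → Bool
  | [] => false
  | [_] => false
  | c1 :: c2 :: rest => (c1 = '(' && c2 = ')') || pvHasPair (c2 :: rest)

theorem pvRepl_len_le : ∀ s, (pvRepl s).length ≤ s.length := by
  intro s
  induction s using pvRepl.induct with
  | case1 => simp [pvRepl]
  | case2 => simp [pvRepl]
  | case3 c1 c2 rest h ih => simp only [pvRepl, if_pos h, List.length_cons]; omega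
  | case4 c1 c2 rest h ih => simp only [pvRepl, if_neg h, List.length_cons]; simpa using ih

theorem pvRepl_len_lt : ∀ s, pvHasPair s = true → (pvRepl s).length < s.length := by
  intro s
  induction s using pvRepl.induct with
  | case1 => simp [pvHasPair]
  | case2 => simp [pvHasPair]
  | case3 c1 c2 rest h ih =>
    intro _
    have := pvRepl_len_le rest
    simp only [pvRepl, if_pos h, List.length_cons]; omega
  | case4 c1 c2 rest h ih =>
    intro hp
    have hp' : pvHasPair (c2 :: rest) = true := by
      simp only [pvHasPair, Bool.or_eq_true, Bool.and_eq_true, decide_eq_true_eq] at hp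
      rcases hp with h1 | h2
      · exact absurd h1 h
      · exact h2
    have := ih hp'
    simp only [List.length_cons] at this ⊢
    simp only [pvRepl, if_neg h, List.length_cons]; omega

-- Python: while '()' in s: s = s.replace('()', '')
def pvLoopB (s : List Char) : List Char :=
  if pvHasPair s = true then pvLoopB (pvRepl s) else s
termination_by s.length
decreasing_by exact pvRepl_len_lt s (by assumption)

def contains_unmatched_lp_py_alt (string : String) : Bool :=
  let s := string.toList.filter pvParens
  !(pvLoopB s).isEmpty

-- ===== PRECONDITION & SPEC =====
def Spec_contains_unmatched_lp_py (string : String) (out : Bool) : Prop := out = contains_unmatched_lp_py_alt string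
instance (string : String) (out : Bool) : Decidable (Spec_contains_unmatched_lp_py string out) := by unfold Spec_contains_unmatched_lp_py; infer_instance

-- ===== CLAIM (what is proved, stated in full; the proofs are below) =====
def Claim_equal_contains_unmatched_lp_py : Prop := ∀ (string : String), Dom_contains_unmatched_lp_py string → Spec_contains_unmatched_lp_py string (contains_unmatched_lp_py string)

-- ===== LEMMAS AND PROOFS =====

-- A's loop depends only on the stack length.
def pvAux : List Char → Nat → Bool
  | [], n => decide (n ≠ 0)
  | c :: rest, n =>
    if c = '(' then pvAux rest (n + 1)
    else if c = ')' then
      match n with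
      | 0 => true
      | k + 1 => pvAux rest k
    else pvAux rest n

theorem pvLoopA_eq_aux (cs : List Char) : ∀ st : List Char, pvLoopA cs st = pvAux cs st.length := by
  induction cs with
  | nil => intro st; cases st <;> simp [pvLoopA, pvAux]
  | cons c rest ih =>
    intro st
    by_cases h1 : c = '('
    · simpa [pvLoopA, pvAux, h1] using ih ('(' :: st)
    · by_cases h2 : c = ')'
      · cases st with
        | nil => simp [pvLoopA, pvAux, h1, h2]
        | cons x t => simpa [pvLoopA, pvAux, h1, h2] using ih t
      · simpa [pvLoopA, pvAux, h1, h2] using ih st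

-- pvAux ignores non-paren characters, so filtering does not change it.
theorem pvAux_filter (cs : List Char) : ∀ n, pvAux (cs.filter pvParens) n = pvAux cs n := by
  induction cs with
  | nil => intro n; rfl
  | cons c rest ih =>
    intro n
    by_cases h1 : c = '('
    · simp [List.filter, pvParens, pvAux, h1, ih]
    · by_cases h2 : c = ')'
      · cases n <;> simp [List.filter, pvParens, pvAux, h1, h2, ih]
      · simp [List.filter, pvParens, pvAux, h1, h2, ih]

-- Deleting an adjacent "()" pair never changes pvAux.
theorem pvAux_repl (s : List Char) : ∀ n, pvAux (pvRepl s) n = pvAux s n := by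
  induction s using pvRepl.induct with
  | case1 => intro n; rfl
  | case2 => intro n; rfl
  | case3 c1 c2 rest h ih =>
    intro n
    simp only [pvRepl, if_pos h]
    rw [ih]
    obtain ⟨rfl, rfl⟩ := h
    simp [pvAux]
  | case4 c1 c2 rest h ih =>
    intro n
    by_cases h1 : c1 = '('
    · subst h1
      have h2 : ¬ (c2 = ')') := fun hc => h ⟨rfl, hc⟩
      simp [pvRepl, pvAux, h2, ih]
    · by_cases h2 : c1 = ')'
      · cases n <;> simp [pvRepl, if_neg h, pvAux, h1, h2, ih]
      · simp [pvRepl, if_neg h, pvAux, h1, h2, ih]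

theorem pvAux_loopB (s : List Char) : ∀ n, pvAux (pvLoopB s) n = pvAux s n := by
  induction s using pvLoopB.induct with
  | case1 s h ih =>
    intro n
    rw [pvLoopB, if_pos h, ih n, pvAux_repl]
  | case2 s h => intro n; rw [pvLoopB, if_neg h]

theorem pvLoopB_noPair (s : List Char) : pvHasPair (pvLoopB s) = false := by
  induction s using pvLoopB.induct with
  | case1 s h ih => rw [pvLoopB, if_pos h]; exact ih
  | case2 s h => rw [pvLoopB, if_neg h]; simpa using h

theorem pvRepl_all (p : Char → Bool) : ∀ s : List Char, s.all p = true → (pvRepl s).all p = true := by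
  intro s
  induction s using pvRepl.induct with
  | case1 => intro _; simp [pvRepl]
  | case2 c => intro hs; simpa [pvRepl] using hs
  | case3 c1 c2 rest h ih =>
    intro hs
    simp only [List.all_cons, Bool.and_eq_true] at hs
    simpa [pvRepl, if_pos h] using ih hs.2.2
  | case4 c1 c2 rest h ih =>
    intro hs
    simp only [List.all_cons, Bool.and_eq_true] at hs
    simp only [pvRepl, if_neg h, List.all_cons, Bool.and_eq_true]
    exact ⟨hs.1, ih (by simp [hs.2.1, hs.2.2])⟩

theorem pvLoopB_all (p : Char → Bool) (s : List Char) (hs : s.all p = true) :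
    (pvLoopB s).all p = true := by
  induction s using pvLoopB.induct with
  | case1 s h ih => rw [pvLoopB, if_pos h]; exact ih (pvRepl_all p s hs)
  | case2 s h => rwa [pvLoopB, if_neg h]

-- In a parens-only string with no adjacent "()", everything after a '(' is '('.
theorem pvAfterOpen (s : List Char) (hp : s.all pvParens = true)
    (hn : pvHasPair ('(' :: s) = false) : s.all (fun c => c = '(') = true := by
  induction s with
  | nil => rfl
  | cons c t ih =>
    simp only [pvHasPair, Bool.or_eq_false_iff, Bool.and_eq_false_iff] at hn
    simp only [List.all_cons, Bool.and_eq_true] at hp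
    have hc : c = '(' := by
      rcases Bool.or_eq_true_iff.mp hp.1 with h1 | h2
      · simpa using h1
      · exfalso
        rcases hn.1 with h | h
        · simp at h
        · exact absurd (by simpa using h2) (by simpa using h)
    subst hc
    have hn' : pvHasPair ('(' :: t) = false := by
      have := hn.2
      cases t with
      | nil => rfl
      | cons d u =>
        simp only [pvHasPair, Bool.or_eq_false_iff, Bool.and_eq_false_iff] at this ⊢
        exact this
    simp [ih hp.2 hn']

theorem pvAux_allOpen (s : List Char) (h : s.all (fun c => c = '(') = true) :
    ∀ n, pvAux s (n + 1) = true := by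
  induction s with
  | nil => intro n; simp [pvAux]
  | cons c t ih =>
    intro n
    simp only [List.all_cons, Bool.and_eq_true, decide_eq_true_eq] at h
    rw [h.1]
    simpa [pvAux] using ih h.2 (n + 1)

-- Normal-form characterisation: parens-only, no adjacent pair ⇒ pvAux at 0 is "nonempty".
theorem pvAux_normal (s : List Char) (hp : s.all pvParens = true)
    (hn : pvHasPair s = false) : pvAux s 0 = !s.isEmpty := by
  cases s with
  | nil => rfl
  | cons c t =>
    simp only [List.all_cons, Bool.and_eq_true] at hp
    rcases Bool.or_eq_true_iff.mp hp.1 with h1 | h2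
    · have hc : c = '(' := by simpa using h1
      subst hc
      have := pvAfterOpen t hp.2 hn
      simpa [pvAux] using pvAux_allOpen t this 0
    · have hc : c = ')' := by simpa using h2
      subst hc
      simp [pvAux]

-- ===== VERDICT (by name: the statement is the Claim_ definition above) =====
theorem contains_unmatched_lp_py_spec : Claim_equal_contains_unmatched_lp_py := by
  intro s _
  unfold Spec_contains_unmatched_lp_py contains_unmatched_lp_py contains_unmatched_lp_py_alt
  rw [pvLoopA_eq_aux]
  simp only [List.length_nil]
  have hall : (s.toList.filter pvParens).all pvParens = true := by
    simp [List.all_eq_true]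
  have h1 : pvAux (pvLoopB (s.toList.filter pvParens)) 0 = pvAux s.toList 0 := by
    rw [pvAux_loopB, pvAux_filter]
  rw [← h1, pvAux_normal _ (pvLoopB_all _ _ hall) (pvLoopB_noPair _)]
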